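-- pv_equiv track=rewrite | github.com/VvikK/GreenTown | logicFunctions.py | gridCreation
-- ===== SOURCE A (Python) =====
-- def gridCreation(grid, num):
--     grid[0][num//2] = 0
--     for i in range(1, num):
--         for j in range(num):
--             grid[i][j] = grid[i - 1][j]
--         if i <= num//2:
--             if i % 2 == 0:
--                 grid[i][num//2 - (i + 1) // 2] = 0
--             else:
--                 grid[i][num//2 + (i + 1) // 2] = 0
--         else:
--             if i % 2 == 0:
--                 grid[i][num - (i - 1) // 2 - 1] = 1
--             else:
--                 grid[i][(i + 1 - (num//2)) // 2 + (num+1)%2 + num//4] = 1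
--
--     return grid
-- ===== SOURCE B (Python) =====
-- def gridCreation(grid, num):
--     grid[0][num // 2] = 0
--     base = grid[0][:num]
--     for r in range(1, num):
--         grid[r][:num] = base
--     for i in range(1, num):
--         half = num // 2
--         if i <= half:
--             col = half - (i + 1) // 2 if i % 2 == 0 else half + (i + 1) // 2
--             val = 0
--         else:
--             col = num - (i - 1) // 2 - 1 if i % 2 == 0 else (i + 1 - half) // 2 + (num + 1) % 2 + num // 4
--             val = 1
--         for r in range(i, num):
--             grid[r][col] = val
--     return grid
-- ===== Notes on version B (the rewrite author's own statement) =====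
-- stated objective: alternative
-- what changed: B first copies the base row (after setting its center) into every row at once, then for each step i stamps that step's single (col, val) down the whole column for rows i..num-1, replacing A's row-by-row copy-previous-row-then-patch loop by a fill-then-propagate-down-columns pass.
import Mathlib
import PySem

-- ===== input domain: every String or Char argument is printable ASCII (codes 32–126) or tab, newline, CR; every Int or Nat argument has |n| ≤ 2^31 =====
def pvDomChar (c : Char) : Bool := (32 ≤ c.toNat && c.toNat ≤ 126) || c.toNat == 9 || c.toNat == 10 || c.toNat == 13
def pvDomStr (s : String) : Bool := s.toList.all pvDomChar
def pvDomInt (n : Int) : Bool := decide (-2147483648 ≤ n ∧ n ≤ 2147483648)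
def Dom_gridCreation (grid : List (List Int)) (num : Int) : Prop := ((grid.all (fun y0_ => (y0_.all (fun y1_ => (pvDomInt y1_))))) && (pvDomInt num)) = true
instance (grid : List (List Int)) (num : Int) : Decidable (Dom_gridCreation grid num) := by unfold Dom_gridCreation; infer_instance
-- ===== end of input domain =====

-- B fills every row with the base row (after setting its center) in one pass and then stamps
-- each step's single changed cell down its column for all later rows, replacing A's
-- row-by-row copy-previous-row-then-patch loop (objective: alternative decomposition).
-- Both Pythons mutate `grid` in place; the equivalence proved here is about the RETURN value only.

-- ===== PORT A =====
-- grid[i][j] = v  (Python index semantics via PySem; shared by both ports as in both Pythons)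
def pvSetCell (g : List (List Int)) (i j v : Int) : List (List Int) :=
  PySem.List.pySetD g i (PySem.List.pySetD (PySem.List.pyGetD g i []) j v)

def gridCreation (grid : List (List Int)) (num : Int) : List (List Int) :=
  let g0 := pvSetCell grid 0 (PySem.Int.floordiv num 2) 0
  (PySem.List.pyRange 1 num 1).foldl (fun g i =>
    let g := (PySem.List.pyRange 0 num 1).foldl
      (fun g j => pvSetCell g i j (PySem.List.pyGetD (PySem.List.pyGetD g (i - 1) []) j 0)) g
    if i ≤ PySem.Int.floordiv num 2 then
      if PySem.Int.mod i 2 = 0 then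
        pvSetCell g i (PySem.Int.floordiv num 2 - PySem.Int.floordiv (i + 1) 2) 0
      else
        pvSetCell g i (PySem.Int.floordiv num 2 + PySem.Int.floordiv (i + 1) 2) 0
    else
      if PySem.Int.mod i 2 = 0 then
        pvSetCell g i (num - PySem.Int.floordiv (i - 1) 2 - 1) 1
      else
        pvSetCell g i (PySem.Int.floordiv (i + 1 - PySem.Int.floordiv num 2) 2
                        + PySem.Int.mod (num + 1) 2 + PySem.Int.floordiv num 4) 1) g0

-- ===== PORT B =====
-- grid[r][:num] = base  is ported by hand as "base ++ old_row[num:]"; exact for 0 ≤ num,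
-- and the loop only runs when 2 ≤ num.
def gridCreation_alt (grid : List (List Int)) (num : Int) : List (List Int) :=
  let g0 := pvSetCell grid 0 (PySem.Int.floordiv num 2) 0
  let base := PySem.List.slice (PySem.List.pyGetD g0 0 []) none (some num)
  let g1 := (PySem.List.pyRange 1 num 1).foldl
    (fun g r => PySem.List.pySetD g r (base ++ (PySem.List.pyGetD g r []).drop num.toNat)) g0
  (PySem.List.pyRange 1 num 1).foldl (fun g i =>
    let half := PySem.Int.floordiv num 2
    let cv : Int × Int :=
      if i ≤ half then
        (if PySem.Int.mod i 2 = 0 then half - PySem.Int.floordiv (i + 1) 2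
         else half + PySem.Int.floordiv (i + 1) 2, 0)
      else
        (if PySem.Int.mod i 2 = 0 then num - PySem.Int.floordiv (i - 1) 2 - 1
         else PySem.Int.floordiv (i + 1 - half) 2 + PySem.Int.mod (num + 1) 2
               + PySem.Int.floordiv num 4, 1)
    (PySem.List.pyRange i num 1).foldl (fun g r => pvSetCell g r cv.1 cv.2) g) g1

-- ===== PRECONDITION & SPEC =====
-- Pre_ is exactly A's return domain (everything outside it makes A raise IndexError): for
-- num ≤ 0 only the center write happens, so its Python index must be valid in row 0; for
-- num ≥ 1 the first num rows must exist with at least num cells each, and for num = 2 row 1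
-- additionally needs at least 3 cells because A's stamp for i = 1 writes column 2.
def Pre_gridCreation (grid : List (List Int)) (num : Int) : Prop :=
  if num ≤ 0 then
    grid ≠ [] ∧ PySem.Raise.InRange (grid.getD 0 []).length (PySem.Int.floordiv num 2)
  else
    num ≤ (grid.length : Int) ∧ (∀ row ∈ grid.take num.toNat, num ≤ (row.length : Int)) ∧
      (num = 2 → 3 ≤ ((grid.getD 1 []).length : Int))

instance (grid : List (List Int)) (num : Int) : Decidable (Pre_gridCreation grid num) := by
  unfold Pre_gridCreation; infer_instance

def pvWitness_gridCreation : List (List Int) × Int :=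
  ([[5, 5, 5], [5, 5, 5], [5, 5, 5]], 3)

def Spec_gridCreation (grid : List (List Int)) (num : Int) (out : List (List Int)) : Prop := out = gridCreation_alt grid num
instance (grid : List (List Int)) (num : Int) (out : List (List Int)) : Decidable (Spec_gridCreation grid num out) := by unfold Spec_gridCreation; infer_instance

-- ===== CLAIM (what is proved, stated in full; the proofs are below) =====
def Claim_equal_gridCreation : Prop := ∀ (grid : List (List Int)) (num : Int), Dom_gridCreation grid num → Pre_gridCreation grid num → Spec_gridCreation grid num (gridCreation grid num)

-- ===== LEMMAS AND PROOFS =====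

-- step functions: rfl-equal to the fold bodies of the two ports
def pvStepA (num : Int) (g : List (List Int)) (i : Int) : List (List Int) :=
  let g := (PySem.List.pyRange 0 num 1).foldl
    (fun g j => pvSetCell g i j (PySem.List.pyGetD (PySem.List.pyGetD g (i - 1) []) j 0)) g
  if i ≤ PySem.Int.floordiv num 2 then
    if PySem.Int.mod i 2 = 0 then
      pvSetCell g i (PySem.Int.floordiv num 2 - PySem.Int.floordiv (i + 1) 2) 0
    else
      pvSetCell g i (PySem.Int.floordiv num 2 + PySem.Int.floordiv (i + 1) 2) 0
  else
    if PySem.Int.mod i 2 = 0 then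
      pvSetCell g i (num - PySem.Int.floordiv (i - 1) 2 - 1) 1
    else
      pvSetCell g i (PySem.Int.floordiv (i + 1 - PySem.Int.floordiv num 2) 2
                      + PySem.Int.mod (num + 1) 2 + PySem.Int.floordiv num 4) 1

def pvCV (num i : Int) : Int × Int :=
  if i ≤ PySem.Int.floordiv num 2 then
    (if PySem.Int.mod i 2 = 0 then PySem.Int.floordiv num 2 - PySem.Int.floordiv (i + 1) 2
     else PySem.Int.floordiv num 2 + PySem.Int.floordiv (i + 1) 2, 0)
  else
    (if PySem.Int.mod i 2 = 0 then num - PySem.Int.floordiv (i - 1) 2 - 1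
     else PySem.Int.floordiv (i + 1 - PySem.Int.floordiv num 2) 2 + PySem.Int.mod (num + 1) 2
           + PySem.Int.floordiv num 4, 1)

def pvFill (num : Int) (base : List Int) (g : List (List Int)) (r : Int) : List (List Int) :=
  PySem.List.pySetD g r (base ++ (PySem.List.pyGetD g r []).drop num.toNat)

def pvStampB (num : Int) (g : List (List Int)) (i : Int) : List (List Int) :=
  (PySem.List.pyRange i num 1).foldl (fun g r => pvSetCell g r (pvCV num i).1 (pvCV num i).2) g

lemma gridCreation_eq (grid : List (List Int)) (num : Int) :
    gridCreation grid num =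
      (PySem.List.pyRange 1 num 1).foldl (pvStepA num)
        (pvSetCell grid 0 (PySem.Int.floordiv num 2) 0) := rfl

lemma gridCreation_alt_eq (grid : List (List Int)) (num : Int) :
    gridCreation_alt grid num =
      (PySem.List.pyRange 1 num 1).foldl (pvStampB num)
        ((PySem.List.pyRange 1 num 1).foldl
          (pvFill num (PySem.List.slice
            (PySem.List.pyGetD (pvSetCell grid 0 (PySem.Int.floordiv num 2) 0) 0 []) none (some num)))
          (pvSetCell grid 0 (PySem.Int.floordiv num 2) 0)) := rfl

-- pvSetCell at a natural row index
lemma pvSetCell_natCast (g : List (List Int)) (k : Nat) (j v : Int) :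
    pvSetCell g (k : Int) j v = g.set k (PySem.List.pySetD (g.getD k []) j v) := by
  simp [pvSetCell, PySem.List.pySetD_natCast, PySem.List.pyGetD_natCast]

-- bounds of the stamped column
lemma pvCV_bounds (num i : Int) (h1 : 1 ≤ i) (h2 : i < num) (h3 : num ≠ 2) :
    0 ≤ (pvCV num i).1 ∧ (pvCV num i).1 < num := by
  have e2 : ∀ a : Int, PySem.Int.floordiv a 2 = a / 2 := fun a =>
    PySem.Int.floordiv_eq_ediv_of_pos (by omega)
  have e4 : ∀ a : Int, PySem.Int.floordiv a 4 = a / 4 := fun a =>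
    PySem.Int.floordiv_eq_ediv_of_pos (by omega)
  have m2 : ∀ a : Int, PySem.Int.mod a 2 = a % 2 := fun a =>
    PySem.Int.mod_eq_emod_of_pos (by omega)
  unfold pvCV
  simp only [e2, e4, m2]
  split_ifs <;> constructor <;> omega

lemma pv_hcol (N i : Nat) (h1 : 1 ≤ i) (h2 : i + 2 ≤ N) :
    0 ≤ (pvCV (N : Int) (i : Int)).1 ∧ (pvCV (N : Int) (i : Int)).1 < (N : Int) :=
  pvCV_bounds _ _ (by omega) (by omega) (by omega)

lemma pv_set_getD_self (g : List (List Int)) (k : Nat) (x : List Int) (h : k < g.length) :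
    (g.set k x).getD k [] = x := by
  rw [List.getD_eq_getElem?_getD, List.getElem?_set_self (by simpa using h), Option.getD_some]

lemma pv_set_getD_ne (g : List (List Int)) (k r : Nat) (x : List Int) (h : k ≠ r) :
    (g.set k x).getD r [] = g.getD r [] := by
  rw [List.getD_eq_getElem?_getD, List.getElem?_set_ne h, ← List.getD_eq_getElem?_getD]

-- the row obtained by applying the stamps of steps i = 1 .. k in order
def pvStamps (num : Int) (k : Nat) (l : List Int) : List Int :=
  (List.range k).foldl
    (fun l t => PySem.List.pySetD l (pvCV num ((t : Int) + 1)).1 (pvCV num ((t : Int) + 1)).2) l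

lemma pvStamps_succ (num : Int) (k : Nat) (l : List Int) :
    pvStamps num (k + 1) l
      = PySem.List.pySetD (pvStamps num k l) (pvCV num ((k : Int) + 1)).1
          (pvCV num ((k : Int) + 1)).2 := by
  simp [pvStamps, List.range_succ]

lemma pvStamps_length (num : Int) (k : Nat) (l : List Int) :
    (pvStamps num k l).length = l.length := by
  induction k with
  | zero => rfl
  | succ k ih => rw [pvStamps_succ, PySem.List.length_pySetD, ih]

lemma pySetD_append_left (a b : List Int) (c v : Int) (h0 : 0 ≤ c)
    (h1 : c < (a.length : Int)) :
    PySem.List.pySetD (a ++ b) c v = PySem.List.pySetD a c v ++ b := by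
  rw [PySem.List.pySetD_of_nonneg _ _ h0, PySem.List.pySetD_of_nonneg _ _ h0,
    List.set_append, if_pos (by omega)]

lemma pvStamps_append (num : Int) (k : Nat) (a b : List Int)
    (h : ∀ t : Nat, t < k →
      0 ≤ (pvCV num ((t : Int) + 1)).1 ∧ (pvCV num ((t : Int) + 1)).1 < (a.length : Int)) :
    pvStamps num k (a ++ b) = pvStamps num k a ++ b := by
  induction k with
  | zero => rfl
  | succ k ih =>
    rw [pvStamps_succ, pvStamps_succ, ih (fun t ht => h t (by omega))]
    exact pySetD_append_left _ _ _ _ (h k (by omega)).1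
      (by rw [pvStamps_length]; exact (h k (by omega)).2)

lemma pvStamps_split (N j : Nat) (hj : j + 2 ≤ N) (base tail : List Int)
    (hbase : base.length = N) :
    pvStamps (N : Int) j (base ++ tail) = pvStamps (N : Int) j base ++ tail := by
  apply pvStamps_append
  intro t ht
  have h := pv_hcol N (t + 1) (by omega) (by omega)
  have hc : ((t : Int) + 1) = ((t + 1 : Nat) : Int) := by push_cast; ring
  rw [hc, hbase]
  exact h

-- the inner j-loop of A writes the first n cells of a over r, keeping r's tail
lemma pv_rowcopy (a : List Int) (n : Nat) (hn : n ≤ a.length) :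
    ∀ (d m : Nat) (r : List Int), m + d = n → n ≤ r.length →
      r.take m = a.take m →
      (PySem.List.pyRange (m : Int) (n : Int) 1).foldl
        (fun r j => PySem.List.pySetD r j (PySem.List.pyGetD a j 0)) r
      = a.take n ++ r.drop n := by
  intro d
  induction d with
  | zero =>
    intro m r hm hr ht
    rw [PySem.List.pyRange_one_eq_nil (by omega)]
    simp only [List.foldl_nil]
    have hm' : m = n := by omega
    subst hm'
    conv_lhs => rw [← List.take_append_drop m r]
    rw [ht]
  | succ d ih =>
    intro m r hm hr ht
    rw [PySem.List.pyRange_one_cons (by omega : (m : Int) < (n : Int))]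
    simp only [List.foldl_cons]
    rw [PySem.List.pySetD_natCast, PySem.List.pyGetD_natCast]
    have hc : ((m : Int) + 1) = ((m + 1 : Nat) : Int) := by push_cast; ring
    rw [hc]
    rw [ih (m + 1) _ (by omega) (by simpa using hr) ?_]
    · rw [List.drop_set, if_pos (by omega : m < n)]
    · rw [List.take_add_one, List.take_add_one, List.take_set,
        List.set_eq_of_length_le (by simp), ht,
        List.getElem?_set_self (by omega), List.getElem?_eq_getElem (by omega : m < a.length)]
      rw [List.getD_eq_getElem _ _ (by omega : m < a.length)]

lemma pv_lift (g : List (List Int)) (k : Nat) (hk : 1 ≤ k) (hklen : k < g.length) :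
    ∀ (js : List Int) (r : List Int),
      js.foldl (fun g' j => pvSetCell g' (k : Int) j
          (PySem.List.pyGetD (PySem.List.pyGetD g' ((k : Int) - 1) []) j 0)) (g.set k r)
        = g.set k (js.foldl (fun r j => PySem.List.pySetD r j
            (PySem.List.pyGetD (g.getD (k - 1) []) j 0)) r) := by
  intro js
  induction js with
  | nil => intro r; rfl
  | cons j js ih =>
    intro r
    simp only [List.foldl_cons]
    have hkm : ((k : Int) - 1) = ((k - 1 : Nat) : Int) := by omega
    have hne : k ≠ (k - 1 : Nat) := by omega
    have hgetm : PySem.List.pyGetD (g.set k r) ((k : Int) - 1) [] = g.getD (k - 1) [] := by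
      rw [hkm, PySem.List.pyGetD_natCast, List.getD_eq_getElem?_getD,
        List.getElem?_set_ne hne, ← List.getD_eq_getElem?_getD]
    have hself : (g.set k r).getD k [] = r := by
      rw [List.getD_eq_getElem?_getD, List.getElem?_set_self (by simpa using hklen),
        Option.getD_some]
    rw [hgetm, pvSetCell_natCast, hself, List.set_set]
    exact ih (PySem.List.pySetD r j (PySem.List.pyGetD (g.getD (k - 1) []) j 0))

lemma pv_copy_fold (g : List (List Int)) (k : Nat) (hk : 1 ≤ k) (hklen : k < g.length)
    (num : Int) (hnum : 0 ≤ num) (hk1 : num ≤ ((g.getD k []).length : Int))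
    (hk2 : num ≤ ((g.getD (k - 1) []).length : Int)) :
    (PySem.List.pyRange 0 num 1).foldl
      (fun g' j => pvSetCell g' (k : Int) j
        (PySem.List.pyGetD (PySem.List.pyGetD g' ((k : Int) - 1) []) j 0)) g
    = g.set k ((g.getD (k - 1) []).take num.toNat ++ (g.getD k []).drop num.toNat) := by
  have hg : g = g.set k (g.getD k []) := by
    rw [List.getD_eq_getElem _ _ hklen, List.set_getElem_self]
  conv_lhs => rw [hg]
  rw [pv_lift g k hk hklen]
  congr 1
  have hnum' : num = ((num.toNat : Nat) : Int) := by omega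
  rw [hnum']
  have h0 : (0 : Int) = ((0 : Nat) : Int) := by norm_num
  rw [h0]
  simp only [Int.toNat_natCast]
  exact pv_rowcopy (g.getD (k - 1) []) num.toNat (by omega) num.toNat 0 (g.getD k [])
    (by omega) (by omega) (by simp)

-- one outer iteration of A = "overwrite the first num cells of row k with row k-1's,
-- then stamp the pvCV cell"
lemma pv_stepA_eq (g : List (List Int)) (N k : Nat) (h1 : 1 ≤ k) (hklen : k < g.length)
    (hrk : N ≤ (g.getD k []).length) (hrk1 : N ≤ (g.getD (k - 1) []).length) :
    pvStepA (N : Int) g (k : Int) =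
      g.set k (PySem.List.pySetD ((g.getD (k - 1) []).take N ++ (g.getD k []).drop N)
        (pvCV (N : Int) (k : Int)).1 (pvCV (N : Int) (k : Int)).2) := by
  have hcopy := pv_copy_fold g k h1 hklen (N : Int) (by omega) (by exact_mod_cast hrk)
    (by exact_mod_cast hrk1)
  simp only [Int.toNat_natCast] at hcopy
  have hself : (g.set k ((g.getD (k - 1) []).take N ++ (g.getD k []).drop N)).getD k []
      = (g.getD (k - 1) []).take N ++ (g.getD k []).drop N :=
    pv_set_getD_self g k _ hklen
  simp only [pvStepA, pvCV, hcopy]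
  split_ifs <;> simp only [] <;>
    rw [pvSetCell_natCast, hself, List.set_set]

-- A-side invariant: after processing i = 1 .. k-1, row r (1 ≤ r < k) carries the stamps
-- 1..r applied to base ++ its original tail; other rows are untouched
lemma pv_mainA (g0 : List (List Int)) (N : Nat)
    (hlen : N ≤ g0.length) (hrows : ∀ r < N, N ≤ (g0.getD r []).length)
    (hbase : ((g0.getD 0 []).take N).length = N) :
    ∀ k : Nat, 1 ≤ k → k ≤ N →
      (∀ r : Nat, 1 ≤ r → r < k →
        ((PySem.List.pyRange 1 (k : Int) 1).foldl (pvStepA (N : Int)) g0).getD r []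
          = pvStamps (N : Int) r ((g0.getD 0 []).take N ++ (g0.getD r []).drop N)) ∧
      (∀ r : Nat, r = 0 ∨ k ≤ r →
        ((PySem.List.pyRange 1 (k : Int) 1).foldl (pvStepA (N : Int)) g0).getD r []
          = g0.getD r []) ∧
      ((PySem.List.pyRange 1 (k : Int) 1).foldl (pvStepA (N : Int)) g0).length = g0.length := by
  intro k
  induction k with
  | zero => intro h; exact absurd h (by norm_num)
  | succ k ih =>
    intro h1k hkN
    by_cases hk0 : k = 0
    · subst hk0
      rw [show ((0 + 1 : Nat) : Int) = 1 by norm_num, PySem.List.pyRange_one_eq_nil (by norm_num)]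
      exact ⟨fun r hr1 hr2 => absurd hr2 (by omega), fun r _ => rfl, rfl⟩
    · have hk1 : 1 ≤ k := by omega
      obtain ⟨hstamped, huntouched, hlenA⟩ := ih hk1 (by omega)
      have hsplit : PySem.List.pyRange 1 ((k + 1 : Nat) : Int) 1 =
          PySem.List.pyRange 1 (k : Int) 1 ++ [(k : Int)] := by
        rw [show ((k + 1 : Nat) : Int) = (k : Int) + 1 by push_cast; ring,
          PySem.List.pyRange_one_succ_right (by omega)]
      rw [hsplit]
      simp only [List.foldl_append, List.foldl_cons, List.foldl_nil]
      set base := (g0.getD 0 []).take N with hbasedef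
      set FA := (PySem.List.pyRange 1 (k : Int) 1).foldl (pvStepA (N : Int)) g0 with hFA
      have hkN' : k < N := by omega
      have hrowk : FA.getD k [] = g0.getD k [] := huntouched k (Or.inr (le_refl k))
      have hrowk1len : N ≤ (FA.getD (k - 1) []).length := by
        by_cases hk2 : k = 1
        · rw [hk2, huntouched 0 (Or.inl rfl)]; exact hrows 0 (by omega)
        · rw [hstamped (k - 1) (by omega) (by omega), pvStamps_length, List.length_append,
            hbase, List.length_drop]
          omega
      have hstep := pv_stepA_eq FA N k hk1 (by omega)
        (by rw [hrowk]; exact hrows k hkN') hrowk1len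
      have htake : (FA.getD (k - 1) []).take N = pvStamps (N : Int) (k - 1) base := by
        by_cases hk2 : k = 1
        · rw [hk2]; simp only [Nat.sub_self]
          rw [huntouched 0 (Or.inl rfl)]
          rfl
        · rw [hstamped (k - 1) (by omega) (by omega),
            pvStamps_split N (k - 1) (by omega) base _ hbase,
            List.take_left' (by rw [pvStamps_length]; exact hbase)]
      have hrowval : PySem.List.pySetD ((FA.getD (k - 1) []).take N ++ (FA.getD k []).drop N)
            (pvCV (N : Int) (k : Int)).1 (pvCV (N : Int) (k : Int)).2
          = pvStamps (N : Int) k (base ++ (g0.getD k []).drop N) := by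
        rw [htake, hrowk]
        rw [show k = (k - 1) + 1 by omega, pvStamps_succ]
        rw [show ((k - 1 : Nat) : Int) + 1 = ((k : Int)) by omega]
        rw [pvStamps_split N (k - 1) (by omega) base _ hbase]
        rw [show (k - 1) + 1 = k by omega]
      rw [hstep, hrowval]
      refine ⟨?_, ?_, by rw [List.length_set]; exact hlenA⟩
      · intro r hr1 hr2
        by_cases hrk : r = k
        · subst hrk
          exact pv_set_getD_self _ _ _ (by omega)
        · rw [pv_set_getD_ne _ _ _ _ (by omega)]
          exact hstamped r hr1 (by omega)
      · intro r hr
        rw [pv_set_getD_ne _ _ _ _ (by omega)]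
        exact huntouched r (by omega)

-- B-side: the fill loop writes base ++ original tail into rows 1 .. k-1
lemma pv_fillB (g0 : List (List Int)) (N : Nat) (base : List Int)
    (hlen : N ≤ g0.length) :
    ∀ k : Nat, 1 ≤ k → k ≤ N →
      (∀ r : Nat, 1 ≤ r → r < k →
        ((PySem.List.pyRange 1 (k : Int) 1).foldl (pvFill (N : Int) base) g0).getD r []
          = base ++ (g0.getD r []).drop N) ∧
      (∀ r : Nat, r = 0 ∨ k ≤ r →
        ((PySem.List.pyRange 1 (k : Int) 1).foldl (pvFill (N : Int) base) g0).getD r []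
          = g0.getD r []) ∧
      ((PySem.List.pyRange 1 (k : Int) 1).foldl (pvFill (N : Int) base) g0).length
        = g0.length := by
  intro k
  induction k with
  | zero => intro h; exact absurd h (by norm_num)
  | succ k ih =>
    intro h1k hkN
    by_cases hk0 : k = 0
    · subst hk0
      rw [show ((0 + 1 : Nat) : Int) = 1 by norm_num, PySem.List.pyRange_one_eq_nil (by norm_num)]
      exact ⟨fun r hr1 hr2 => absurd hr2 (by omega), fun r _ => rfl, rfl⟩
    · have hk1 : 1 ≤ k := by omega
      obtain ⟨hfilled, huntouched, hlenB⟩ := ih hk1 (by omega)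
      have hsplit : PySem.List.pyRange 1 ((k + 1 : Nat) : Int) 1 =
          PySem.List.pyRange 1 (k : Int) 1 ++ [(k : Int)] := by
        rw [show ((k + 1 : Nat) : Int) = (k : Int) + 1 by push_cast; ring,
          PySem.List.pyRange_one_succ_right (by omega)]
      rw [hsplit]
      simp only [List.foldl_append, List.foldl_cons, List.foldl_nil]
      set G := (PySem.List.pyRange 1 (k : Int) 1).foldl (pvFill (N : Int) base) g0 with hG
      have hstep : pvFill (N : Int) base G (k : Int)
          = G.set k (base ++ (g0.getD k []).drop N) := by
        unfold pvFill
        rw [PySem.List.pySetD_natCast, PySem.List.pyGetD_natCast, Int.toNat_natCast,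
          huntouched k (Or.inr (le_refl k))]
      rw [hstep]
      refine ⟨?_, ?_, by rw [List.length_set]; exact hlenB⟩
      · intro r hr1 hr2
        by_cases hrk : r = k
        · subst hrk
          exact pv_set_getD_self _ _ _ (by omega)
        · rw [pv_set_getD_ne _ _ _ _ (by omega)]
          exact hfilled r hr1 (by omega)
      · intro r hr
        rw [pv_set_getD_ne _ _ _ _ (by omega)]
        exact huntouched r (by omega)

-- one column stamp: the inner r-loop of B sets cell (r, c) for every r in [a, a+d)
lemma pv_colfold (c v : Int) :
    ∀ (d a : Nat) (g : List (List Int)), a + d ≤ g.length →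
      (∀ r : Nat,
        ((PySem.List.pyRange (a : Int) ((a + d : Nat) : Int) 1).foldl
            (fun g r => pvSetCell g r c v) g).getD r []
          = if a ≤ r ∧ r < a + d then PySem.List.pySetD (g.getD r []) c v else g.getD r []) ∧
      ((PySem.List.pyRange (a : Int) ((a + d : Nat) : Int) 1).foldl
          (fun g r => pvSetCell g r c v) g).length = g.length := by
  intro d
  induction d with
  | zero =>
    intro a g h
    rw [PySem.List.pyRange_one_eq_nil (by omega)]
    exact ⟨fun r => by rw [if_neg (by omega)]; rfl, rfl⟩
  | succ d ih =>
    intro a g h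
    rw [PySem.List.pyRange_one_cons (by push_cast; omega)]
    simp only [List.foldl_cons]
    rw [pvSetCell_natCast, show ((a : Int) + 1) = ((a + 1 : Nat) : Int) by push_cast; ring,
      show ((a + (d + 1) : Nat) : Int) = (((a + 1) + d : Nat) : Int) by push_cast; ring]
    obtain ⟨h1, h2⟩ := ih (a + 1) (g.set a (PySem.List.pySetD (g.getD a []) c v))
      (by rw [List.length_set]; omega)
    refine ⟨?_, by rw [h2, List.length_set]⟩
    intro r
    rw [h1 r]
    by_cases hr : a + 1 ≤ r ∧ r < a + 1 + d
    · rw [if_pos hr, if_pos (by omega), pv_set_getD_ne _ _ _ _ (by omega)]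
    · rw [if_neg hr]
      by_cases hra : r = a
      · subst hra
        rw [if_pos (by omega)]
        exact pv_set_getD_self _ _ _ (by omega)
      · rw [if_neg (by omega), pv_set_getD_ne _ _ _ _ (by omega)]

-- B-side invariant for the stamping loop: after processing i = 1 .. k-1, row r carries the
-- stamps 1 .. min(k-1, r)
lemma pv_mainB (g1 g0 : List (List Int)) (N : Nat)
    (hlen : N ≤ g0.length) (base : List Int)
    (hfilled : ∀ r : Nat, 1 ≤ r → r < N → g1.getD r [] = base ++ (g0.getD r []).drop N)
    (huntouched0 : ∀ r : Nat, r = 0 ∨ N ≤ r → g1.getD r [] = g0.getD r [])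
    (hlen1 : g1.length = g0.length) :
    ∀ k : Nat, 1 ≤ k → k ≤ N →
      (∀ r : Nat, 1 ≤ r → r < k →
        ((PySem.List.pyRange 1 (k : Int) 1).foldl (pvStampB (N : Int)) g1).getD r []
          = pvStamps (N : Int) r (base ++ (g0.getD r []).drop N)) ∧
      (∀ r : Nat, k ≤ r → r < N →
        ((PySem.List.pyRange 1 (k : Int) 1).foldl (pvStampB (N : Int)) g1).getD r []
          = pvStamps (N : Int) (k - 1) (base ++ (g0.getD r []).drop N)) ∧
      (∀ r : Nat, r = 0 ∨ N ≤ r →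
        ((PySem.List.pyRange 1 (k : Int) 1).foldl (pvStampB (N : Int)) g1).getD r []
          = g0.getD r []) ∧
      ((PySem.List.pyRange 1 (k : Int) 1).foldl (pvStampB (N : Int)) g1).length
        = g0.length := by
  intro k
  induction k with
  | zero => intro h; exact absurd h (by norm_num)
  | succ k ih =>
    intro h1k hkN
    by_cases hk0 : k = 0
    · subst hk0
      rw [show ((0 + 1 : Nat) : Int) = 1 by norm_num, PySem.List.pyRange_one_eq_nil (by norm_num)]
      exact ⟨fun r hr1 hr2 => absurd hr2 (by omega),
        fun r hr1 hr2 => hfilled r (by omega) hr2,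
        huntouched0, hlen1⟩
    · have hk1 : 1 ≤ k := by omega
      obtain ⟨hdone, hpending, hrest, hlenH⟩ := ih hk1 (by omega)
      have hsplit : PySem.List.pyRange 1 ((k + 1 : Nat) : Int) 1 =
          PySem.List.pyRange 1 (k : Int) 1 ++ [(k : Int)] := by
        rw [show ((k + 1 : Nat) : Int) = (k : Int) + 1 by push_cast; ring,
          PySem.List.pyRange_one_succ_right (by omega)]
      rw [hsplit]
      simp only [List.foldl_append, List.foldl_cons, List.foldl_nil]
      set H := (PySem.List.pyRange 1 (k : Int) 1).foldl (pvStampB (N : Int)) g1 with hH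
      have hkN' : k < N := by omega
      have hstampB : pvStampB (N : Int) H (k : Int)
          = (PySem.List.pyRange (k : Int) ((k + (N - k) : Nat) : Int) 1).foldl
              (fun g r => pvSetCell g r (pvCV (N : Int) (k : Int)).1
                (pvCV (N : Int) (k : Int)).2) H := by
        unfold pvStampB
        rw [show ((k + (N - k) : Nat) : Int) = (N : Int) by push_cast; omega]
      obtain ⟨hc1, hc2⟩ := pv_colfold (pvCV (N : Int) (k : Int)).1
        (pvCV (N : Int) (k : Int)).2 (N - k) k H (by omega)
      rw [hstampB]
      have hstamped : ∀ r : Nat, k ≤ r → r < N →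
          ((PySem.List.pyRange (k : Int) ((k + (N - k) : Nat) : Int) 1).foldl
              (fun g r => pvSetCell g r (pvCV (N : Int) (k : Int)).1
                (pvCV (N : Int) (k : Int)).2) H).getD r []
            = pvStamps (N : Int) k (base ++ (g0.getD r []).drop N) := by
        intro r hr1 hr2
        rw [hc1 r, if_pos (by omega), hpending r hr1 hr2,
          show k = (k - 1) + 1 by omega, pvStamps_succ,
          show ((k - 1 : Nat) : Int) + 1 = (k : Int) by omega,
          show (k - 1) + 1 = k by omega]
      refine ⟨?_, ?_, ?_, by rw [hc2, hlenH]⟩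
      · intro r hr1 hr2
        by_cases hrk : r < k
        · rw [hc1 r, if_neg (by omega)]
          exact hdone r hr1 hrk
        · have hre : r = k := by omega
          rw [hre]
          exact hstamped k (le_refl k) (by omega)
      · intro r hr1 hr2
        rw [hstamped r (by omega) hr2, show k + 1 - 1 = k from rfl]
      · intro r hr
        rw [hc1 r, if_neg (by omega)]
        exact hrest r hr

lemma pv_ext (f g : List (List Int)) (hl : f.length = g.length)
    (h : ∀ r : Nat, f.getD r [] = g.getD r []) : f = g := by
  apply List.ext_getElem hl
  intro n h1 h2
  have hn := h n
  rwa [List.getD_eq_getElem _ _ h1, List.getD_eq_getElem _ _ h2] at hn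

-- ===== VERDICT (by name: the statement is the Claim_ definition above) =====
theorem gridCreation_spec : Claim_equal_gridCreation := by
  intro grid num _hdom hpre
  unfold Spec_gridCreation
  unfold Pre_gridCreation at hpre
  by_cases hneg : num ≤ 0
  · rw [gridCreation_eq, gridCreation_alt_eq, PySem.List.pyRange_one_eq_nil (by omega)]
    rfl
  · rw [if_neg hneg] at hpre
    obtain ⟨hnlen, hrows, _h2⟩ := hpre
    obtain ⟨N, rfl⟩ : ∃ N : Nat, num = (N : Int) := ⟨num.toNat, by omega⟩
    have hN1 : 1 ≤ N := by omega
    rw [gridCreation_eq, gridCreation_alt_eq]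
    set g0 := pvSetCell grid 0 (PySem.Int.floordiv (N : Int) 2) 0 with hg0
    have hg0eq : g0 = grid.set 0
        (PySem.List.pySetD (grid.getD 0 []) (PySem.Int.floordiv (N : Int) 2) 0) := by
      have h := pvSetCell_natCast grid 0 (PySem.Int.floordiv (N : Int) 2) 0
      rw [show ((0 : Nat) : Int) = (0 : Int) by norm_num] at h
      exact h
    have hlen0 : g0.length = grid.length := by rw [hg0eq]; simp
    have hglen : N ≤ g0.length := by omega
    have hrows' : ∀ r < N, N ≤ (grid.getD r []).length := by
      intro r hr
      have hrlen : r < grid.length := by omega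
      have hmem : grid[r] ∈ grid.take N := by
        have hrt : r < (grid.take N).length := by simp; omega
        have hg : (grid.take N)[r] = grid[r] := List.getElem_take
        rw [← hg]
        exact List.getElem_mem hrt
      have hlr := hrows _ (by simpa using hmem)
      rw [List.getD_eq_getElem _ _ hrlen]
      omega
    have hrows0 : ∀ r < N, N ≤ (g0.getD r []).length := by
      intro r hr
      rw [hg0eq]
      by_cases h0 : r = 0
      · rw [h0, pv_set_getD_self _ _ _ (by omega), PySem.List.length_pySetD]
        exact hrows' 0 (by omega)
      · rw [pv_set_getD_ne _ _ _ _ (by omega)]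
        exact hrows' r hr
    have hbase : ((g0.getD 0 []).take N).length = N := by
      rw [List.length_take]
      have := hrows0 0 (by omega)
      omega
    have hbase' : PySem.List.slice (PySem.List.pyGetD g0 0 []) none (some (N : Int))
        = (g0.getD 0 []).take N := by
      rw [PySem.List.pyGetD_zero, PySem.List.slice_to (g0.getD 0 []) (by omega)]
      simp
    rw [hbase']
    obtain ⟨hA1, hA2, hA3⟩ := pv_mainA g0 N hglen hrows0 hbase N hN1 (le_refl N)
    obtain ⟨hF1, hF2, hF3⟩ := pv_fillB g0 N ((g0.getD 0 []).take N) hglen N hN1 (le_refl N)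
    obtain ⟨hB1, hB2, hB3, hB4⟩ := pv_mainB _ g0 N hglen ((g0.getD 0 []).take N)
      hF1 hF2 hF3 N hN1 (le_refl N)
    apply pv_ext _ _ (by rw [hA3, hB4])
    intro r
    by_cases hr0 : r = 0
    · rw [hA2 r (Or.inl hr0), hB3 r (Or.inl hr0)]
    · by_cases hrN : r < N
      · rw [hA1 r (by omega) hrN, hB1 r (by omega) hrN]
      · rw [hA2 r (Or.inr (by omega)), hB3 r (Or.inr (by omega))]
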